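-- pv_equiv track=rewrite | github.com/seovalue/Algorithm | python_code/윈터코딩_2번.py | solution
-- ===== SOURCE A (Python) =====
-- def rotate(text, rotation):
--     answer = ''
--     if abs(rotation) == len(text):
--         if rotation > 0:
--             return text
--         else:
--             return text[::-1]
--     text = list(text)
--     flag = True if rotation > 0 else False
--     for _ in range(abs(rotation)):
--         if flag: #양수로 회전한 결과인 경우
--             tmp = text.pop(0)
--             text.append(tmp)
--         else:
--             tmp = text.pop(-1)
--             text.insert(0,tmp)
--     return ''.join(text)
--
-- def solution(encrypted_text, key, rotation):
--     answer = ''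
--     # 회전하기 이전의 암호화 문장으로 돌려준다.
--     encrypted_text = rotate(encrypted_text, rotation)
--     for k, e in zip(key, encrypted_text):
--         step = ord(k) - 96
--         if ord(e) - step < 97: #소문자 a보다 벗어나면
--             plain = chr(ord('z') - (96 - (ord(e) - step)))
--         else:
--             plain = chr(ord(e) - step)
--         answer += plain
--     return answer
-- ===== SOURCE B (Python) =====
-- def solution(encrypted_text, key, rotation):
--     if encrypted_text:
--         r = rotation % len(encrypted_text)
--         encrypted_text = encrypted_text[r:] + encrypted_text[:r]
--     return ''.join(_decrypt(k, e) for k, e in zip(key, encrypted_text))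
--
-- def _decrypt(k, e):
--     d = ord(e) - (ord(k) - 96)
--     return chr(d + 26 if d < 97 else d)
-- ===== Notes on version B (the rewrite author's own statement) =====
-- stated objective: faster
-- what changed: A rotates the text one character at a time with |rotation| pop/append (or pop/insert) list operations before decrypting; B computes the cyclic shift in one step as rotation % len and slices, so the rotation is O(n) instead of O(|rotation|*n).
-- intended difference: When rotation = -len(text) and at some key-covered position the Caesar step sends the text character and the corresponding character of the reversed text to different characters, A returns the decryption of the REVERSED text (its abs(rotation)==len special case) while B returns the decryption of the unrotated text, the intended value since a full-cycle rotation is the identity. — e.g. on solution("ab", "aa", -2): A returns "az", B returns "za"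
import Mathlib
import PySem

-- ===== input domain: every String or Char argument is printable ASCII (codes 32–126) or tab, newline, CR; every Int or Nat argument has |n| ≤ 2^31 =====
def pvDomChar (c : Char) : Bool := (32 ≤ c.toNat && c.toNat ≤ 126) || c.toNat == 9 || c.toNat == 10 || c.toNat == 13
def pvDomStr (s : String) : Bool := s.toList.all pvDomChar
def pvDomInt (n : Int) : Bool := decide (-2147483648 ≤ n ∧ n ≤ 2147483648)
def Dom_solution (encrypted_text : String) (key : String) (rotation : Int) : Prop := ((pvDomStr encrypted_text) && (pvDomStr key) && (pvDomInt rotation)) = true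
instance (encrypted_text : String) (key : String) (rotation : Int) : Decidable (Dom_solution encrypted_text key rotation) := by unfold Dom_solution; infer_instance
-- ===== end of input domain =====

-- B replaces A's O(|rotation|·n) one-character-step rotation loop by a single O(n) cyclic
-- shift computed from rotation % n; on rotation = -len(text) A decrypts the REVERSED text
-- (its abs(rotation)==len branch), B decrypts the text unrotated, which is the intended
-- value since a full-cycle rotation is the identity.


-- ===== PORT A =====
-- one iteration of A's rotate loop: pop(0) & append (flag) / pop(-1) & insert(0,·)
def rotStepA (flag : Bool) (l : List Char) : Option (List Char) :=
  if flag then (PySem.List.pop? l 0).map (fun pr => pr.2 ++ [pr.1])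
  else (PySem.List.pop? l (-1)).map (fun pr => PySem.List.insert pr.2 0 pr.1)

-- rotate(text, rotation); none exactly where Python raises IndexError (pop from empty list)
def rotateA (text : String) (rotation : Int) : Option (List Char) :=
  let t := text.toList
  if |rotation| = (t.length : Int) then
    if rotation > 0 then some t
    else PySem.List.slice? t none none (-1)          -- text[::-1]
  else
    let flag := decide (rotation > 0)
    (List.range rotation.natAbs).foldl (fun acc _ => acc.bind (rotStepA flag)) (some t)

def solution (encrypted_text : String) (key : String) (rotation : Int) : String :=
  match rotateA encrypted_text rotation with
  | none => ""                                        -- unreachable under Pre_ (Python raises IndexError)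
  | some et =>
    String.mk ((key.toList.zip et).foldl (fun acc p =>
      let step : Int := (p.1.toNat : Int) - 96
      if (p.2.toNat : Int) - step < 97 then
        acc ++ [Char.ofNat (122 - (96 - ((p.2.toNat : Int) - step))).toNat]
      else
        acc ++ [Char.ofNat ((p.2.toNat : Int) - step).toNat]) [])

-- ===== PORT B =====
def decChar (k e : Char) : Char :=
  let d : Int := (e.toNat : Int) - ((k.toNat : Int) - 96)
  Char.ofNat (if d < 97 then d + 26 else d).toNat

def solution_alt (encrypted_text : String) (key : String) (rotation : Int) : String :=
  let t := encrypted_text.toList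
  let t' := if t.isEmpty then t
    else
      let r := PySem.Int.mod rotation (t.length : Int)   -- rotation % len
      PySem.List.slice t (some r) none ++ PySem.List.slice t none (some r)
  String.mk ((key.toList.zip t').map (fun p => decChar p.1 p.2))

-- ===== PRECONDITION & SPEC =====
-- Pre_ excludes only empty encrypted_text with rotation ≠ 0, where A raises IndexError.
def Pre_solution (encrypted_text : String) (key : String) (rotation : Int) : Prop :=
  encrypted_text.toList ≠ [] ∨ rotation = 0
instance (encrypted_text : String) (key : String) (rotation : Int) : Decidable (Pre_solution encrypted_text key rotation) := by unfold Pre_solution; infer_instance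

def pvWitness_solution : String × String × Int := ("abc", "key", 1)

-- the character code produced by the Caesar step for key char k on text char a
def csh (k a : Char) : Int :=
  let x : Int := (a.toNat : Int) + 96 - k.toNat
  x + if x < 97 then 26 else 0

-- When rotation = -len(text) and, at some position covered by the key, the Caesar step sends
-- the text character and the corresponding character of the reversed text to different
-- characters, A returns the decryption of the REVERSED text while B returns the decryption
-- of the unrotated text — the intended value, since a full-cycle rotation is the identity.
def D_solution (encrypted_text : String) (key : String) (rotation : Int) : Prop :=
  rotation = -(encrypted_text.toList.length : Int) ∧
    ∃ p ∈ key.toList.zip (encrypted_text.toList.zip encrypted_text.toList.reverse),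
      csh p.1 p.2.1 ≠ csh p.1 p.2.2
instance (encrypted_text : String) (key : String) (rotation : Int) : Decidable (D_solution encrypted_text key rotation) := by unfold D_solution; infer_instance

def Spec_solution (encrypted_text : String) (key : String) (rotation : Int) (out : String) : Prop := ¬ D_solution encrypted_text key rotation → out = solution_alt encrypted_text key rotation
instance (encrypted_text : String) (key : String) (rotation : Int) (out : String) : Decidable (Spec_solution encrypted_text key rotation out) := by unfold Spec_solution; infer_instance

def pvDiffWitness_solution : String × String × Int := ("ab", "aa", -2)
def pvDiffWitnessOut_solution : String × String := ("az", "za")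

-- ===== CLAIM (what is proved, stated in full; the proofs are below) =====
def Claim_unchanged_solution : Prop := ∀ (encrypted_text : String) (key : String) (rotation : Int), Dom_solution encrypted_text key rotation → Pre_solution encrypted_text key rotation → Spec_solution encrypted_text key rotation (solution encrypted_text key rotation)
def Claim_exact_solution : Prop := ∀ (encrypted_text : String) (key : String) (rotation : Int), Dom_solution encrypted_text key rotation → Pre_solution encrypted_text key rotation → D_solution encrypted_text key rotation → solution encrypted_text key rotation ≠ solution_alt encrypted_text key rotation
def Claim_changed_solution : Prop := Dom_solution (pvDiffWitness_solution.1) (pvDiffWitness_solution.2.1) (pvDiffWitness_solution.2.2) ∧ Pre_solution (pvDiffWitness_solution.1) (pvDiffWitness_solution.2.1) (pvDiffWitness_solution.2.2) ∧ D_solution (pvDiffWitness_solution.1) (pvDiffWitness_solution.2.1) (pvDiffWitness_solution.2.2) ∧ solution (pvDiffWitness_solution.1) (pvDiffWitness_solution.2.1) (pvDiffWitness_solution.2.2) = pvDiffWitnessOut_solution.1 ∧ solution_alt (pvDiffWitness_solution.1) (pvDiffWitness_solution.2.1) (pvDiffWitness_solution.2.2) = pvDiffWitnessOut_solution.2 ∧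 pvDiffWitnessOut_solution.1 ≠ pvDiffWitnessOut_solution.2

-- ===== LEMMAS AND PROOFS =====

-- A's per-character fold equals mapping B's decChar
lemma foldA_eq_map (ps : List (Char × Char)) (acc : List Char) :
    ps.foldl (fun acc p =>
      let step : Int := (p.1.toNat : Int) - 96
      if (p.2.toNat : Int) - step < 97 then
        acc ++ [Char.ofNat (122 - (96 - ((p.2.toNat : Int) - step))).toNat]
      else
        acc ++ [Char.ofNat ((p.2.toNat : Int) - step).toNat]) acc
    = acc ++ ps.map (fun p => decChar p.1 p.2) := by
  induction ps generalizing acc with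
  | nil => simp
  | cons p ps ih =>
    simp only [List.foldl_cons, List.map_cons, ih, decChar]
    have h1 : (122 - (96 - ((p.2.toNat : Int) - ((p.1.toNat : Int) - 96)))) =
        ((p.2.toNat : Int) - ((p.1.toNat : Int) - 96)) + 26 := by ring
    by_cases h : (p.2.toNat : Int) - ((p.1.toNat : Int) - 96) < 97 <;>
      simp [h, h1, List.append_assoc]

-- solution, expressed through the rotated list
lemma solution_eq_dec (text key : String) (rotation : Int) (et : List Char)
    (h : rotateA text rotation = some et) :
    solution text key rotation
      = String.mk ((key.toList.zip et).map (fun p => decChar p.1 p.2)) := by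
  unfold solution
  rw [h]
  exact congrArg String.mk (by rw [foldA_eq_map, List.nil_append])

lemma stepA_true (l : List Char) (h : l ≠ []) :
    rotStepA true l = some (l.rotate 1) := by
  cases l with
  | nil => exact absurd rfl h
  | cons x xs => simp [rotStepA, PySem.List.pop?_zero_cons]

lemma stepA_false (l : List Char) (h : l ≠ []) :
    rotStepA false l = some (l.rotate (l.length - 1)) := by
  obtain ⟨xs, x, rfl⟩ := (List.eq_nil_or_concat l).resolve_left h
  simp only [List.concat_eq_append]
  have hlen : (xs ++ [x]).length - 1 = xs.length := by simp
  rw [hlen, List.rotate_eq_drop_append_take (by simp)]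
  simp [rotStepA, PySem.List.pop?_last, PySem.List.insert_zero]

lemma loopA_true (t : List Char) (h : t ≠ []) (k : ℕ) :
    (List.range k).foldl (fun acc _ => acc.bind (rotStepA true)) (some t)
      = some (t.rotate k) := by
  induction k with
  | zero => simp
  | succ k ih =>
    rw [List.range_succ, List.foldl_append, ih]
    simp only [List.foldl_cons, List.foldl_nil, Option.bind_some]
    rw [stepA_true _ (by simp [List.rotate_eq_nil_iff, h]), List.rotate_rotate]

lemma loopA_false (t : List Char) (h : t ≠ []) (k : ℕ) :
    (List.range k).foldl (fun acc _ => acc.bind (rotStepA false)) (some t)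
      = some (t.rotate (k * (t.length - 1))) := by
  induction k with
  | zero => simp
  | succ k ih =>
    rw [List.range_succ, List.foldl_append, ih]
    simp only [List.foldl_cons, List.foldl_nil, Option.bind_some]
    rw [stepA_false _ (by simp [List.rotate_eq_nil_iff, h]), List.rotate_rotate,
      List.length_rotate]
    ring_nf

-- a domain character's code lies in [9, 126]
lemma domChar_bounds (c : Char) (h : pvDomChar c = true) : 9 ≤ c.toNat ∧ c.toNat ≤ 126 := by
  simp [pvDomChar] at h
  omega

lemma charOfNat_toNat (n : Nat) (h : n < 55296) : (Char.ofNat n).toNat = n := by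
  unfold Char.ofNat
  rw [dif_pos (Or.inl h)]
  rfl

-- equal Caesar codes give the same decrypted character
lemma dec_eq_of_not_bad (k a b : Char) (h : csh k a = csh k b) :
    decChar k a = decChar k b := by
  simp only [csh] at h
  simp only [decChar]
  congr 1
  split_ifs at h ⊢ <;> omega

-- distinct Caesar codes of domain characters give distinct decrypted characters
lemma dec_ne_of_bad (k a b : Char)
    (hk : 9 ≤ k.toNat ∧ k.toNat ≤ 126) (ha : 9 ≤ a.toNat ∧ a.toNat ≤ 126)
    (hb : 9 ≤ b.toNat ∧ b.toNat ≤ 126) (h : csh k a ≠ csh k b) :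
    decChar k a ≠ decChar k b := by
  simp only [csh] at h
  simp only [decChar]
  intro heq
  apply h
  have hxb : (if (a.toNat : Int) - ((k.toNat : Int) - 96) < 97
      then (a.toNat : Int) - ((k.toNat : Int) - 96) + 26
      else (a.toNat : Int) - ((k.toNat : Int) - 96)).toNat < 55296 := by
    split_ifs <;> omega
  have hyb : (if (b.toNat : Int) - ((k.toNat : Int) - 96) < 97
      then (b.toNat : Int) - ((k.toNat : Int) - 96) + 26
      else (b.toNat : Int) - ((k.toNat : Int) - 96)).toNat < 55296 := by
    split_ifs <;> omega
  have h2 := congrArg Char.toNat heq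
  rw [charOfNat_toNat _ hxb, charOfNat_toNat _ hyb] at h2
  split_ifs at h2 ⊢ <;> omega

-- pointwise agreement lifts to the decrypted zip
lemma map_dec_zip_eq (kl t1 t2 : List Char) (hlen : t1.length = t2.length)
    (h : ∀ p ∈ kl.zip (t1.zip t2), csh p.1 p.2.1 = csh p.1 p.2.2) :
    (kl.zip t1).map (fun p => decChar p.1 p.2)
      = (kl.zip t2).map (fun p => decChar p.1 p.2) := by
  induction kl generalizing t1 t2 with
  | nil => simp
  | cons k kl ih =>
    cases t1 with
    | nil =>
      cases t2 with
      | nil => rfl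
      | cons b t2 => simp at hlen
    | cons a t1 =>
      cases t2 with
      | nil => simp at hlen
      | cons b t2 =>
        simp only [List.zip_cons_cons, List.map_cons]
        rw [dec_eq_of_not_bad k a b (h (k, a, b) (by simp)),
          ih t1 t2 (by simpa using hlen)
            (fun p hp => h p (List.mem_cons_of_mem _ hp))]

-- one bad pair of domain characters makes the decrypted zips differ
lemma map_dec_zip_ne (kl t1 t2 : List Char)
    (hdk : ∀ c ∈ kl, pvDomChar c = true) (hd1 : ∀ c ∈ t1, pvDomChar c = true)
    (hd2 : ∀ c ∈ t2, pvDomChar c = true)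
    (h : ∃ p ∈ kl.zip (t1.zip t2), csh p.1 p.2.1 ≠ csh p.1 p.2.2) :
    (kl.zip t1).map (fun p => decChar p.1 p.2)
      ≠ (kl.zip t2).map (fun p => decChar p.1 p.2) := by
  induction kl generalizing t1 t2 with
  | nil => simp at h
  | cons k kl ih =>
    cases t1 with
    | nil => simp at h
    | cons a t1 =>
      cases t2 with
      | nil => simp at h
      | cons b t2 =>
        obtain ⟨p, hp, hbad⟩ := h
        simp only [List.zip_cons_cons, List.mem_cons] at hp
        simp only [List.zip_cons_cons, List.map_cons]
        rcases hp with rfl | hp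
        · intro he
          injection he with h1 _
          exact dec_ne_of_bad k a b
            (domChar_bounds _ (hdk k (by simp)))
            (domChar_bounds _ (hd1 a (by simp)))
            (domChar_bounds _ (hd2 b (by simp))) hbad h1
        · intro he
          injection he with _ h2
          exact ih t1 t2 (fun c hc => hdk c (List.mem_cons_of_mem _ hc))
            (fun c hc => hd1 c (List.mem_cons_of_mem _ hc))
            (fun c hc => hd2 c (List.mem_cons_of_mem _ hc)) ⟨p, hp, hbad⟩ h2

-- B's rotated list is a List.rotate
lemma altRot_eq_rotate (t : List Char) (h : t ≠ []) (rotation : Int) :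
    (PySem.List.slice t (some (PySem.Int.mod rotation (t.length : Int))) none ++
      PySem.List.slice t none (some (PySem.Int.mod rotation (t.length : Int))))
    = t.rotate (PySem.Int.mod rotation (t.length : Int)).toNat := by
  have hn : (0:Int) < (t.length : Int) := by
    have := List.length_pos_of_ne_nil h
    exact_mod_cast this
  have h0 : 0 ≤ PySem.Int.mod rotation (t.length : Int) := PySem.Int.mod_nonneg _ hn
  have hlt : PySem.Int.mod rotation (t.length : Int) < (t.length : Int) :=
    PySem.Int.mod_lt _ hn
  rw [PySem.List.slice_from t h0, PySem.List.slice_to t h0,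
    List.rotate_eq_drop_append_take (by omega)]

-- solution_alt, expressed through List.rotate (nonempty text)
lemma alt_eq_dec (text key : String) (rotation : Int) (h : text.toList ≠ []) :
    solution_alt text key rotation
      = String.mk ((key.toList.zip
          (text.toList.rotate (PySem.Int.mod rotation (text.toList.length : Int)).toNat)).map
            (fun p => decChar p.1 p.2)) := by
  simp only [solution_alt]
  rw [if_neg (by simpa [List.isEmpty_iff] using h), altRot_eq_rotate _ h]

-- the value of B's shift, as a Nat residue
lemma mod_toNat (rotation : Int) (n : ℕ) (hn : 0 < n) :
    (PySem.Int.mod rotation (n : Int)).toNat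
      = if 0 ≤ rotation then rotation.toNat % n
        else (rotation.natAbs * (n - 1)) % n := by
  rw [PySem.Int.mod_eq_emod_of_pos (by exact_mod_cast hn)]
  split_ifs with h
  · have he : rotation % (n : Int) = ((rotation.toNat % n : ℕ) : Int) := by
      rw [← Int.toNat_of_nonneg h]
      exact_mod_cast (Int.natCast_mod rotation.toNat n).symm
    rw [he, Int.toNat_natCast]
  · have hrot : rotation = -(rotation.natAbs : Int) := by omega
    have hcast : ((rotation.natAbs * (n - 1) : ℕ) : Int)
        = (rotation.natAbs : Int) * ((n : Int) - 1) := by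
      push_cast [Nat.cast_sub hn]; ring
    have key : (((rotation.natAbs * (n - 1)) % n : ℕ) : Int) = rotation % (n : Int) := by
      rw [Int.natCast_mod, hcast]
      conv_rhs => rw [hrot]
      have hr : (rotation.natAbs : Int) * ((n : Int) - 1)
          = -(rotation.natAbs : Int) + (rotation.natAbs : Int) * (n : Int) := by ring
      rw [hr, Int.add_mul_emod_self_right]
    have hmn : ((rotation.natAbs * (n - 1)) % n : ℕ) < n := Nat.mod_lt _ hn
    omega

-- B on a full negative rotation: the shift is 0
lemma alt_neg_full (text key : String) (h : text.toList ≠ []) :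
    solution_alt text key (-(text.toList.length : Int))
      = String.mk ((key.toList.zip text.toList).map (fun p => decChar p.1 p.2)) := by
  have hn : 0 < text.toList.length := List.length_pos_of_ne_nil h
  rw [alt_eq_dec _ _ _ h, mod_toNat _ _ hn, if_neg (by omega)]
  have hab : (-(text.toList.length : Int)).natAbs = text.toList.length := by omega
  rw [hab, Nat.mul_mod_right, List.rotate_zero]

-- the list A's rotate(text, rotation) returns, in each of its branches
lemma rotateA_full_pos (text : String) (rotation : Int)
    (habs : |rotation| = (text.toList.length : Int)) (hpos : rotation > 0) :
    rotateA text rotation = some text.toList := by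
  unfold rotateA
  rw [if_pos habs, if_pos hpos]

lemma rotateA_full_neg (text : String) (rotation : Int)
    (habs : |rotation| = (text.toList.length : Int)) (hpos : ¬ rotation > 0) :
    rotateA text rotation = some text.toList.reverse := by
  unfold rotateA
  rw [if_pos habs, if_neg hpos, PySem.List.slice?_none_none_neg_one]

lemma rotateA_loop_pos (text : String) (rotation : Int) (h : text.toList ≠ [])
    (habs : ¬ |rotation| = (text.toList.length : Int)) (hpos : rotation > 0) :
    rotateA text rotation = some (text.toList.rotate rotation.toNat) := by
  unfold rotateA
  rw [if_neg habs]
  have hflag : decide (rotation > 0) = true := by simpa using hpos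
  rw [hflag, loopA_true _ h, show rotation.natAbs = rotation.toNat by omega]

lemma rotateA_loop_neg (text : String) (rotation : Int) (h : text.toList ≠ [])
    (habs : ¬ |rotation| = (text.toList.length : Int)) (hpos : ¬ rotation > 0) :
    rotateA text rotation
      = some (text.toList.rotate (rotation.natAbs * (text.toList.length - 1))) := by
  unfold rotateA
  rw [if_neg habs]
  have hflag : decide (rotation > 0) = false := by simpa using hpos
  rw [hflag, loopA_false _ h]

-- ===== VERDICT (by name: the statement is the Claim_ definition above) =====
theorem solution_spec : Claim_unchanged_solution := by
  intro text key rotation _ hpre hnd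
  by_cases hnil : text.toList = []
  · -- empty text: Pre_ forces rotation = 0; both sides are ""
    have hrot : rotation = 0 := hpre.resolve_left (by simpa using hnil)
    subst hrot
    have hA : rotateA text 0 = some [] := by
      unfold rotateA
      rw [hnil]
      simp [PySem.List.slice?_none_none_neg_one]
    rw [solution_eq_dec _ _ _ _ hA]
    simp only [solution_alt]
    rw [if_pos (by simp [hnil]), hnil]
  · have hn : 0 < text.toList.length := List.length_pos_of_ne_nil hnil
    rw [alt_eq_dec _ _ _ hnil, mod_toNat _ _ hn]
    by_cases habs : |rotation| = (text.toList.length : Int)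
    · have habs' : (rotation.natAbs : Int) = (text.toList.length : Int) := by
        rw [← Int.abs_eq_natAbs]; exact habs
      by_cases hpos : rotation > 0
      · -- rotation = len : A returns the text unchanged; B's shift is len % len = 0
        have hr : rotation = (text.toList.length : Int) := by omega
        rw [solution_eq_dec _ _ _ _ (rotateA_full_pos _ _ habs hpos)]
        rw [if_pos (by omega)]
        have : rotation.toNat % text.toList.length = 0 := by
          rw [hr]; simp
        rw [this, List.rotate_zero]
      · -- rotation = -len : A reverses; B's shift is 0; ¬D_ gives equal key-length prefixes
        have hr : rotation = -(text.toList.length : Int) := by omega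
        rw [solution_eq_dec _ _ _ _ (rotateA_full_neg _ _ habs hpos)]
        rw [if_neg (by omega)]
        have hab : rotation.natAbs = text.toList.length := by omega
        have h0 : rotation.natAbs * (text.toList.length - 1) % text.toList.length = 0 := by
          rw [hab]; exact Nat.mul_mod_right _ _
        rw [h0, List.rotate_zero]
        have hall : ∀ p ∈ key.toList.zip (text.toList.zip text.toList.reverse),
            csh p.1 p.2.1 = csh p.1 p.2.2 := by
          intro p hp
          by_contra hbp
          exact hnd ⟨hr, p, hp, hbp⟩
        rw [← map_dec_zip_eq key.toList text.toList text.toList.reverse (by simp) hall]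
    · by_cases hpos : rotation > 0
      · -- positive loop: k single-step left rotations = rotate by k % len
        rw [solution_eq_dec _ _ _ _ (rotateA_loop_pos _ _ hnil habs hpos)]
        rw [if_pos (by omega), ← List.rotate_mod]
      · -- non-positive loop: k right rotations = rotate by k*(len-1) % len
        rw [solution_eq_dec _ _ _ _ (rotateA_loop_neg _ _ hnil habs hpos)]
        by_cases hz : rotation = 0
        · subst hz
          rw [if_pos le_rfl]
          simp
        · rw [if_neg (by omega), ← List.rotate_mod]

theorem solution_changed : Claim_changed_solution := by
  unfold Claim_changed_solution; decide

theorem solution_tight : Claim_exact_solution := by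
  intro text key rotation hdom _ hd
  obtain ⟨hr, hex⟩ := hd
  have hnil : text.toList ≠ [] := by
    intro hn
    rw [hn] at hex
    simp at hex
  have hdoms : (∀ c ∈ text.toList, pvDomChar c = true) ∧
      (∀ c ∈ key.toList, pvDomChar c = true) := by
    simp only [Dom_solution, pvDomStr, Bool.and_eq_true, List.all_eq_true] at hdom
    exact ⟨hdom.1.1, hdom.1.2⟩
  have habs : |rotation| = (text.toList.length : Int) := by
    rw [hr, abs_neg, Int.abs_natCast]
  rw [solution_eq_dec _ _ _ _ (rotateA_full_neg _ _ habs (by omega)), hr,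
    alt_neg_full _ _ hnil]
  intro he
  exact map_dec_zip_ne key.toList text.toList text.toList.reverse hdoms.2 hdoms.1
    (fun c hc => hdoms.1 c (List.mem_reverse.mp hc)) hex
    (String.ofList_inj.mp he).symm
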